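-- pv_equiv track=rewrite | github.com/LockyChao/PromptMR-plus | callbacks/ttt_callback_ssdu_adaptive.py | _get_modality_from_fname
-- ===== SOURCE A (Python) =====
-- def _get_modality_from_fname(fname: str) -> str:
--     fname_lower = fname.lower()
--     known_modalities = ['t1w', 't2w', 'lge', 'cine', 't1map', 't2map', 'flow2d']
--     for mod in known_modalities:
--         if f'/{mod}/' in fname_lower or f'_{mod}_' in fname_lower:
--             return mod
--     path_parts = fname.split('/')
--     if len(path_parts) > 0 and path_parts[0].lower() in known_modalities:
--         return path_parts[0]
--     return 'default'
-- ===== SOURCE B (Python) =====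
-- def _get_modality_from_fname(fname: str) -> str:
--     fname_lower = fname.lower()
--     known_modalities = ['t1w', 't2w', 'lge', 'cine', 't1map', 't2map', 'flow2d']
--     slash_tokens = set(fname_lower.split('/')[1:-1])
--     underscore_tokens = set(fname_lower.split('_')[1:-1])
--     for mod in known_modalities:
--         if mod in slash_tokens or mod in underscore_tokens:
--             return mod
--     path_parts = fname.split('/')
--     if len(path_parts) > 0 and path_parts[0].lower() in known_modalities:
--         return path_parts[0]
--     return 'default'
-- ===== Notes on version B (the rewrite author's own statement) =====
-- stated objective: idiomatic
-- what changed: B lowercases and tokenizes the filename once per delimiter (split on '/' and '_', keep the interior slice [1:-1], put it in a set) and then looks each known modality up in the two token sets, instead of A's building and scanning for 14 delimiter-wrapped substrings.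
import Mathlib
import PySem

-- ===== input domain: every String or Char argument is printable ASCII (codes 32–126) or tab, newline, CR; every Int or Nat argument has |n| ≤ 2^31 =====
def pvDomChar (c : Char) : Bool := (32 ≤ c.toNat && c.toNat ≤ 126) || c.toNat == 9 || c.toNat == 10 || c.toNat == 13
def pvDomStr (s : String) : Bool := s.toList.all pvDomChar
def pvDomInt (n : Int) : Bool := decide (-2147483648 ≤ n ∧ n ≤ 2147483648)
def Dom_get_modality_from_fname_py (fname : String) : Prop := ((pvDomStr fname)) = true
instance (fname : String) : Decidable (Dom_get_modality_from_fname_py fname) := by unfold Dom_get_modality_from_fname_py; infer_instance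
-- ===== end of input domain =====

-- B tokenizes the lowercased filename once per delimiter (split, interior slice, set) and looks each
-- modality up in the token sets, instead of A's 14 substring scans; objective: idiomatic, same cost class.

def pvKnownMods : List (List Char) :=
  [['t','1','w'], ['t','2','w'], ['l','g','e'], ['c','i','n','e'],
   ['t','1','m','a','p'], ['t','2','m','a','p'], ['f','l','o','w','2','d']]

-- ===== PORT A =====
-- for mod in known_modalities: if f'/{mod}/' in fname_lower or f'_{mod}_' in fname_lower: return mod
def pvALoop (fl : List Char) : List (List Char) → Option (List Char)
  | [] => none
  | m :: rest =>
    if PySem.Chars.isIn ('/' :: m ++ ['/']) fl || PySem.Chars.isIn ('_' :: m ++ ['_']) fl then some m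
    else pvALoop fl rest

def get_modality_from_fname_py (fname : String) : String :=
  let fname_lower := PySem.Chars.lower fname.toList
  match pvALoop fname_lower pvKnownMods with
  | some m => String.ofList m
  | none =>
    match PySem.Chars.splitOn fname.toList ['/'] with            -- path_parts; [0] guarded by len > 0
    | p0 :: _ => if pvKnownMods.contains (PySem.Chars.lower p0) then String.ofList p0 else "default"
    | [] => "default"

-- ===== PORT B =====
-- for mod in known_modalities: if mod in slash_tokens or mod in underscore_tokens: return mod
def pvBLoop (slashToks usToks : PySem.Set (List Char)) : List (List Char) → Option (List Char)
  | [] => none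
  | m :: rest =>
    if slashToks.contains m || usToks.contains m then some m
    else pvBLoop slashToks usToks rest

def get_modality_from_fname_py_alt (fname : String) : String :=
  let fname_lower := PySem.Chars.lower fname.toList
  let slashToks := PySem.Set.ofList (PySem.List.slice (PySem.Chars.splitOn fname_lower ['/']) (some 1) (some (-1)))
  let usToks := PySem.Set.ofList (PySem.List.slice (PySem.Chars.splitOn fname_lower ['_']) (some 1) (some (-1)))
  match pvBLoop slashToks usToks pvKnownMods with
  | some m => String.ofList m
  | none =>
    match PySem.Chars.splitOn fname.toList ['/'] with            -- path_parts; [0] guarded by len > 0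
    | p0 :: _ => if pvKnownMods.contains (PySem.Chars.lower p0) then String.ofList p0 else "default"
    | [] => "default"

-- ===== PRECONDITION & SPEC =====
def Spec_get_modality_from_fname_py (fname : String) (out : String) : Prop := out = get_modality_from_fname_py_alt fname
instance (fname : String) (out : String) : Decidable (Spec_get_modality_from_fname_py fname out) := by unfold Spec_get_modality_from_fname_py; infer_instance

-- ===== CLAIM (what is proved, stated in full; the proofs are below) =====
def Claim_equal_get_modality_from_fname_py : Prop := ∀ (fname : String), Dom_get_modality_from_fname_py fname → Spec_get_modality_from_fname_py fname (get_modality_from_fname_py fname)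

-- ===== LEMMAS AND PROOFS =====

-- PySem's fuelled splitOn on a one-character separator is Mathlib's List.splitOn
theorem pv_go_eq (d : Char) (fuel : Nat) (l cur : List Char) (acc : List (List Char))
    (h : l.length < fuel) :
    PySem.Chars.splitOn.go [d] fuel l cur acc
      = acc.reverse ++ List.splitOnP.go (· == d) l cur := by
  induction fuel generalizing l cur acc with
  | zero => omega
  | succ f ih =>
    cases l with
    | nil => simp [PySem.Chars.splitOn.go, List.splitOnP.go]
    | cons c rest =>
      by_cases hc : c = d
      · subst hc
        have hp : List.isPrefixOf [c] (c :: rest) = true := by simp [List.isPrefixOf]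
        simp only [PySem.Chars.splitOn.go, hp, if_pos, List.splitOnP.go, beq_self_eq_true]
        rw [ih _ _ _ (by simpa using Nat.lt_of_succ_lt_succ h)]
        simp
      · have hp : List.isPrefixOf [d] (c :: rest) = false := by
          simp [List.isPrefixOf]; exact fun h' => absurd h'.symm hc
        have hb : (c == d) = false := by simp [hc]
        simp only [PySem.Chars.splitOn.go, hp, Bool.false_eq_true, if_false, List.splitOnP.go, hb]
        exact ih _ _ _ (by simpa using Nat.lt_of_succ_lt_succ h)

theorem pv_splitOn_single (d : Char) (s : List Char) :
    PySem.Chars.splitOn s [d] = s.splitOn d := by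
  unfold PySem.Chars.splitOn
  rw [pv_go_eq d (s.length + 1) s [] [] (by omega)]
  rfl

-- every piece of s.splitOn d is d-free
theorem pv_splitOn_free (d : Char) (s : List Char) :
    ∀ l ∈ s.splitOn d, d ∉ l := by
  induction s with
  | nil => intro l hl; simp [List.splitOn, List.splitOnP_nil] at hl; simp [hl]
  | cons c rest ih =>
    intro l hl
    rw [List.splitOn, List.splitOnP_cons] at hl
    by_cases hc : c = d
    · subst hc
      simp only [beq_self_eq_true, if_pos, List.mem_cons] at hl
      rcases hl with rfl | hl
      · simp
      · exact ih l hl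
    · have hb : (c == d) = false := by simp [hc]
      rw [hb] at hl; simp only [Bool.false_eq_true, if_false] at hl
      rcases hq : List.splitOnP (· == d) rest with - | ⟨q, qs⟩
      · exact absurd hq (List.splitOnP_ne_nil _ _)
      · rw [hq, List.modifyHead_cons] at hl
        rcases List.mem_cons.mp hl with rfl | hl
        · intro hd
          rcases List.mem_cons.mp hd with rfl | hd
          · exact hc rfl
          · exact ih q (by rw [List.splitOn, hq]; exact List.mem_cons_self) hd
        · exact ih l (by rw [List.splitOn, hq]; exact List.mem_cons.mpr (Or.inr hl))

-- xs[1:-1]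
theorem pv_slice_interior {α : Type} (xs : List α) :
    PySem.List.slice xs (some 1) (some (-1)) = xs.tail.dropLast := by
  cases xs with
  | nil => rfl
  | cons a t =>
    simp [PySem.List.slice, PySem.List.clampIdx, List.dropLast_eq_take]
    split <;> omega

-- an occurrence of a pattern starting with d skips a d-free block
theorem pv_shift (d : Char) (t x y : List Char) (hx : d ∉ x) :
    (d :: t) <:+: (x ++ d :: y) ↔ (d :: t) <:+: (d :: y) := by
  constructor
  · intro h
    induction x with
    | nil => simpa using h
    | cons a x' ih =>
      have ha : d ≠ a := fun he => hx (he ▸ List.mem_cons_self)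
      rcases List.infix_cons_iff.mp (by simpa using h) with hp | hi
      · rcases List.cons_prefix_cons.mp hp with ⟨he, -⟩
        exact absurd he ha
      · exact ih (fun hm => hx (List.mem_cons.mpr (Or.inr hm))) hi
  · intro h
    exact h.trans ((List.suffix_append x (d :: y)).isInfix)

-- a d-free prefix closed by d determines the first block
theorem pv_uniq (d : Char) (m p w : List Char) (hm : d ∉ m) (hp : d ∉ p)
    (h : (m ++ [d]) <+: (p ++ d :: w)) : m = p := by
  induction m generalizing p with
  | nil =>
    cases p with
    | nil => rfl
    | cons q p' =>
      simp only [List.nil_append, List.cons_append] at h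
      rcases List.cons_prefix_cons.mp h with ⟨he, -⟩
      exact absurd he.symm (fun hq => hp (hq ▸ List.mem_cons_self))
  | cons a m' ih =>
    cases p with
    | nil =>
      simp only [List.cons_append, List.nil_append] at h
      rcases List.cons_prefix_cons.mp h with ⟨he, -⟩
      exact absurd he (fun ha => hm (ha ▸ List.mem_cons_self))
    | cons q p' =>
      simp only [List.cons_append] at h
      rcases List.cons_prefix_cons.mp h with ⟨he, htl⟩
      have := ih (fun hx => hm (List.mem_cons.mpr (Or.inr hx)))
        (p := p') (fun hx => hp (List.mem_cons.mpr (Or.inr hx))) htl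
      rw [he, this]

theorem pv_intercal2 (d : Char) (p0 p1 : List Char) (rest : List (List Char)) :
    [d].intercalate (p0 :: p1 :: rest) = p0 ++ d :: [d].intercalate (p1 :: rest) := by
  simp [List.intercalate]

-- forward: an occurrence of d·m·d in the glued list yields an interior block equal to m
theorem pv_fwd (d : Char) (m : List Char) (hm : d ∉ m) :
    ∀ parts : List (List Char), (∀ l ∈ parts, d ∉ l) →
      (d :: m ++ [d]) <:+: [d].intercalate parts → m ∈ parts.tail.dropLast := by
  intro parts
  induction parts with
  | nil => intro _ h; simp [List.intercalate] at h
  | cons p0 rest ih =>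
    intro hfree h
    cases rest with
    | nil =>
      simp [List.intercalate] at h
      exact absurd (h.subset (by simp)) (hfree p0 List.mem_cons_self)
    | cons p1 rest2 =>
      rw [pv_intercal2] at h
      replace h := (pv_shift d (m ++ [d]) p0 ([d].intercalate (p1 :: rest2))
        (hfree p0 List.mem_cons_self)).mp h
      rcases List.infix_cons_iff.mp h with hp | hi
      · rcases List.cons_prefix_cons.mp hp with ⟨-, hp⟩
        cases rest2 with
        | nil =>
          simp [List.intercalate] at hp
          exact absurd (hp.subset (by simp)) (hfree p1 (by simp))
        | cons p2 rest3 =>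
          rw [pv_intercal2] at hp
          have := pv_uniq d m p1 _ hm (hfree p1 (by simp)) hp
          simp [this]
      · have hmem := ih (fun l hl => hfree l (List.mem_cons.mpr (Or.inr hl))) hi
        cases rest2 with
        | nil => simp at hmem
        | cons p2 rest3 =>
          show m ∈ (p1 :: p2 :: rest3).dropLast
          rw [List.dropLast_cons₂]
          exact List.mem_cons.mpr (Or.inr hmem)

-- backward: an interior block equal to m yields an occurrence of d·m·d
theorem pv_bwd (d : Char) (m : List Char) :
    ∀ parts : List (List Char), m ∈ parts.tail.dropLast →
      (d :: m ++ [d]) <:+: [d].intercalate parts := by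
  intro parts
  induction parts with
  | nil => intro h; simp at h
  | cons p0 rest ih =>
    intro h
    simp only [List.tail_cons] at h
    cases rest with
    | nil => simp at h
    | cons p1 rest2 =>
      rw [pv_intercal2]
      have step : (d :: m ++ [d]) <:+: (d :: [d].intercalate (p1 :: rest2)) →
          (d :: m ++ [d]) <:+: (p0 ++ d :: [d].intercalate (p1 :: rest2)) :=
        fun hh => hh.trans (List.suffix_append p0 _).isInfix
      cases rest2 with
      | nil => simp at h
      | cons p2 rest3 =>
        rw [List.dropLast_cons₂] at h
        rcases List.mem_cons.mp h with rfl | h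
        · apply step
          rw [pv_intercal2]
          exact (List.cons_prefix_cons.mpr ⟨rfl, by simp⟩).isInfix
        · apply step
          have := ih (by simpa using h)
          exact List.infix_cons_iff.mpr (Or.inr this)

-- the key fact: '/mod/' in s  ⟺  mod is an interior token of s.split('/')
theorem pv_key (d : Char) (m s : List Char) (hd : d ∉ m) :
    PySem.Chars.isIn (d :: m ++ [d]) s = true ↔ m ∈ (PySem.Chars.splitOn s [d]).tail.dropLast := by
  rw [PySem.Chars.isIn_iff_infix, pv_splitOn_single]
  constructor
  · intro h
    exact pv_fwd d m hd (s.splitOn d) (pv_splitOn_free d s)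
      (by rwa [List.intercalate_splitOn] )
  · intro h
    have := pv_bwd d m (s.splitOn d) h
    rwa [List.intercalate_splitOn] at this

-- the two loops agree when the per-modality predicates agree
theorem pv_loop_congr (fl : List Char) (sT uT : PySem.Set (List Char)) :
    ∀ mods : List (List Char),
      (∀ m ∈ mods,
        (PySem.Chars.isIn ('/' :: m ++ ['/']) fl || PySem.Chars.isIn ('_' :: m ++ ['_']) fl)
          = (sT.contains m || uT.contains m)) →
      pvALoop fl mods = pvBLoop sT uT mods := by
  intro mods
  induction mods with
  | nil => intro _; rfl
  | cons m rest ih =>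
    intro h
    simp only [pvALoop, pvBLoop, h m List.mem_cons_self]
    split
    · rfl
    · exact ih fun m' hm' => h m' (List.mem_cons.mpr (Or.inr hm'))

theorem pv_pred_eq (fl m : List Char) (hs : '/' ∉ m) (hu : '_' ∉ m) :
    (PySem.Chars.isIn ('/' :: m ++ ['/']) fl || PySem.Chars.isIn ('_' :: m ++ ['_']) fl)
      = ((PySem.Set.ofList (PySem.List.slice (PySem.Chars.splitOn fl ['/']) (some 1) (some (-1)))).contains m
         || (PySem.Set.ofList (PySem.List.slice (PySem.Chars.splitOn fl ['_']) (some 1) (some (-1)))).contains m) := by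
  have h1 : PySem.Chars.isIn ('/' :: m ++ ['/']) fl
      = (PySem.Set.ofList (PySem.List.slice (PySem.Chars.splitOn fl ['/']) (some 1) (some (-1)))).contains m := by
    rw [Bool.eq_iff_iff, pv_key '/' m fl hs, PySem.Set.contains_iff, PySem.Set.mem_ofList,
      pv_slice_interior]
  have h2 : PySem.Chars.isIn ('_' :: m ++ ['_']) fl
      = (PySem.Set.ofList (PySem.List.slice (PySem.Chars.splitOn fl ['_']) (some 1) (some (-1)))).contains m := by
    rw [Bool.eq_iff_iff, pv_key '_' m fl hu, PySem.Set.contains_iff, PySem.Set.mem_ofList,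
      pv_slice_interior]
  rw [h1, h2]

-- ===== VERDICT (by name: the statement is the Claim_ definition above) =====
theorem get_modality_from_fname_py_spec : Claim_equal_get_modality_from_fname_py := by
  intro fname _
  unfold Spec_get_modality_from_fname_py
  show get_modality_from_fname_py fname = get_modality_from_fname_py_alt fname
  unfold get_modality_from_fname_py get_modality_from_fname_py_alt
  have hloop := pv_loop_congr (PySem.Chars.lower fname.toList)
    (PySem.Set.ofList (PySem.List.slice (PySem.Chars.splitOn (PySem.Chars.lower fname.toList) ['/']) (some 1) (some (-1))))
    (PySem.Set.ofList (PySem.List.slice (PySem.Chars.splitOn (PySem.Chars.lower fname.toList) ['_']) (some 1) (some (-1))))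
    pvKnownMods
    (by
      intro m hm
      have hprops : '/' ∉ m ∧ '_' ∉ m := by fin_cases hm <;> decide
      exact pv_pred_eq _ m hprops.1 hprops.2)
  simp only []
  rw [hloop]
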